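-- pv_equiv track=rewrite | github.com/DEsipov/algorithms-templates | python/sprint13/final/broken_list_2.py | _break_search
-- ===== SOURCE A (Python) =====
-- def _break_search(array, left, right):
--     """ Поиск индекса разрыва."""
--     if right <= left:
--         return right
--     mid = (left + right) // 2
--     if array[mid] < array[mid - 1]:
--         return mid
--     if array[mid] < array[left]:
--         return _break_search(array, left, mid)
--     elif array[mid] > array[left]:
--         return _break_search(array, mid, right)
-- ===== SOURCE B (Python) =====
-- def _bs_step(array, left, right):
--     """One pure step of the breakpoint search: (True, result) or (False, (left, right))."""
--     if right <= left:
--         return (True, right)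
--     mid = left + (right - left) // 2
--     lo, prev, cur = array[left], array[mid - 1], array[mid]
--     if cur < prev:
--         return (True, mid)
--     if lo < cur:
--         return (False, (mid, right))
--     if lo > cur:
--         return (False, (left, mid))
--     return (True, None)
--
-- def _break_search(array, left, right):
--     """Breakpoint index search, factored into a pure step function iterated by a driver loop."""
--     done, payload = _bs_step(array, left, right)
--     while not done:
--         left, right = payload
--         done, payload = _bs_step(array, left, right)
--     return payload
-- ===== Notes on version B (the rewrite author's own statement) =====
-- stated objective: alternative
-- what changed: Factored the search into a pure step function returning either a result or a narrowed (left,right) state, iterated by a separate driver loop, with the midpoint computed as left+(right-left)//2 and the equal case made an explicit terminal outcome instead of the recursion's implicit fall-through.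
-- outside the precondition, e.g. on _break_search([2, 1, 3], -5, 1): A returns -2, B raises IndexError; on _break_search([2, 1, 3], -5, 2): A returns -2, B raises IndexError
import Mathlib
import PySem

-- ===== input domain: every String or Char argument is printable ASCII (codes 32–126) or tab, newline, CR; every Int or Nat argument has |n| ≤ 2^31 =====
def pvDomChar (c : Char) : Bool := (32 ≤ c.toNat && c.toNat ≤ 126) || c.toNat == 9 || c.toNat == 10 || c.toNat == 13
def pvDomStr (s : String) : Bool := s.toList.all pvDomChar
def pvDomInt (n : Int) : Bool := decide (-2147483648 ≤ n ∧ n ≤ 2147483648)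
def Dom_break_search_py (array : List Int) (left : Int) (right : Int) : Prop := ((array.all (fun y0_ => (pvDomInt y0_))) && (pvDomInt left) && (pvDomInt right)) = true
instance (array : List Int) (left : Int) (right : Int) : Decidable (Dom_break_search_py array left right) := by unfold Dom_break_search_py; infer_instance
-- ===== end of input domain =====

-- B factors the search into a pure step function iterated by a driver loop (alternative decomposition, same values).


-- ===== PORT A =====
-- literal transliteration of the recursive _break_search; array accesses via pyGet? in
-- Python's evaluation order (array[mid], array[mid-1], then array[left]); Python's
-- 'mid = (left + right) // 2' is written inline so that each use is the same expression.
def break_search_py (array : List Int) (left : Int) (right : Int) : Option Int :=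
  if _h : right ≤ left then some right
  else
    match h1 : PySem.List.pyGet? array (PySem.Int.floordiv (left + right) 2),
          _h2 : PySem.List.pyGet? array (PySem.Int.floordiv (left + right) 2 - 1) with
    | some am, some ap =>
      if am < ap then some (PySem.Int.floordiv (left + right) 2)
      else
        match h3 : PySem.List.pyGet? array left with
        | some al =>
          if _h4 : am < al then break_search_py array left (PySem.Int.floordiv (left + right) 2)
          else if _h5 : al < am then break_search_py array (PySem.Int.floordiv (left + right) 2) right
          else none
        | none => none    -- IndexError (outside Pre_)
    | _, _ => none        -- IndexError (outside Pre_)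
termination_by (right - left).toNat
decreasing_by
  · have hb := PySem.Int.floordiv_two_mid_bounds (le_of_lt (lt_of_not_ge _h))
    have : PySem.Int.floordiv (left + right) 2 < right := by
      rw [PySem.Int.floordiv_lt_iff_lt_mul (by omega : (0:Int) < 2)]; omega
    omega
  · have hb := PySem.Int.floordiv_two_mid_bounds (le_of_lt (lt_of_not_ge _h))
    have hne : PySem.Int.floordiv (left + right) 2 ≠ left := by
      intro he
      rw [he] at h1
      rw [h1] at h3
      injection h3 with hv
      omega
    omega

-- ===== PORT B =====
-- transliteration of Source B's pure step function _bs_step: either a final answer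
-- (Sum.inl : '(True, payload)') or a narrowed state (Sum.inr : '(False, (left, right))').
-- Source B reads array[left], array[mid-1], array[mid] in that order; out-of-range reads
-- (IndexError, outside Pre_) surface as the inl none fall-through of the match.
def bsStep (array : List Int) (left : Int) (right : Int) : (Option Int) ⊕ (Int × Int) :=
  if right ≤ left then Sum.inl (some right)
  else
    -- mid = left + (right - left) // 2, written inline at each use;
    -- 'lo, prev, cur = array[left], array[mid - 1], array[mid]' read one by one
    match PySem.List.pyGet? array left with
    | none => Sum.inl none   -- IndexError (outside Pre_)
    | some lo =>
      match PySem.List.pyGet? array (left + (right - left) / 2 - 1) with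
      | none => Sum.inl none   -- IndexError (outside Pre_)
      | some prev =>
        match PySem.List.pyGet? array (left + (right - left) / 2) with
        | none => Sum.inl none   -- IndexError (outside Pre_)
        | some cur =>
          if cur < prev then Sum.inl (some (left + (right - left) / 2))
          else if lo < cur then Sum.inr (left + (right - left) / 2, right)
          else if lo > cur then Sum.inr (left, left + (right - left) / 2)
          else Sum.inl none

-- the step strictly narrows the interval (used only for the driver's termination)
lemma bsStep_shrink (array : List Int) (left right l' r' : Int)
    (h : bsStep array left right = Sum.inr (l', r')) :
    (r' - l').toNat < (right - left).toNat := by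
  unfold bsStep at h
  by_cases hrl : right ≤ left
  · rw [if_pos hrl] at h
    simp at h
  · rw [if_neg hrl] at h
    have hlt : left < right := lt_of_not_ge hrl
    cases e1 : PySem.List.pyGet? array left with
    | none => simp [e1] at h
    | some lo =>
      simp only [e1] at h
      cases e2 : PySem.List.pyGet? array (left + (right - left) / 2 - 1) with
      | none => simp [e2] at h
      | some prev =>
        simp only [e2] at h
        cases e3 : PySem.List.pyGet? array (left + (right - left) / 2) with
        | none => simp [e3] at h
        | some cur =>
          simp only [e3] at h
          by_cases h1 : cur < prev
          · rw [if_pos h1] at h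
            simp at h
          · rw [if_neg h1] at h
            by_cases h2 : lo < cur
            · rw [if_pos h2] at h
              have hp := Sum.inr.inj h
              have hl := congrArg Prod.fst hp
              have hr := congrArg Prod.snd hp
              simp at hl hr
              have hpos : 0 < (right - left) / 2 := by
                rcases Int.lt_or_le 0 ((right - left) / 2) with hq | hq
                · exact hq
                · exfalso
                  have hz : left + (right - left) / 2 = left := by omega
                  rw [hz] at e3
                  rw [e1] at e3
                  injection e3 with e3
                  omega
              omega
            · rw [if_neg h2] at h
              by_cases h3 : lo > cur
              · rw [if_pos h3] at h
                have hp := Sum.inr.inj h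
                have hl := congrArg Prod.fst hp
                have hr := congrArg Prod.snd hp
                simp at hl hr
                have hpos : 0 < (right - left) / 2 := by
                  rcases Int.lt_or_le 0 ((right - left) / 2) with hq | hq
                  · exact hq
                  · exfalso
                    have hz : left + (right - left) / 2 = left := by omega
                    rw [hz] at e3
                    rw [e1] at e3
                    injection e3 with e3
                    omega
                omega
              · rw [if_neg h3] at h
                simp at h

-- driver loop of Source B: iterate the step until it reports done
def break_search_py_alt (array : List Int) (left : Int) (right : Int) : Option Int :=
  match h : bsStep array left right with
  | Sum.inl res => res
  | Sum.inr (l', r') => break_search_py_alt array l' r'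
termination_by (right - left).toNat
decreasing_by exact bsStep_shrink array left right l' r' h

-- ===== PRECONDITION & SPEC =====
-- Pre_ excludes calls with left < right whose bounds fall outside [1-len, len]: there the
-- recursion may raise IndexError (data-dependently it can also return early, through
-- negative-index wraparound, before ever reading the out-of-range array[left]).
def Pre_break_search_py (array : List Int) (left : Int) (right : Int) : Prop :=
  right ≤ left ∨ (1 - (array.length : Int) ≤ left ∧ right ≤ (array.length : Int))
instance (array : List Int) (left : Int) (right : Int) : Decidable (Pre_break_search_py array left right) := by unfold Pre_break_search_py; infer_instance
def pvWitness_break_search_py : List Int × Int × Int := ([4, 5, 1, 2, 3], 0, 4)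
def Spec_break_search_py (array : List Int) (left : Int) (right : Int) (out : Option Int) : Prop := out = break_search_py_alt array left right
instance (array : List Int) (left : Int) (right : Int) (out : Option Int) : Decidable (Spec_break_search_py array left right out) := by unfold Spec_break_search_py; infer_instance

-- ===== CLAIM (what is proved, stated in full; the proofs are below) =====
def Claim_equal_break_search_py : Prop := ∀ (array : List Int) (left : Int) (right : Int), Dom_break_search_py array left right → Pre_break_search_py array left right → Spec_break_search_py array left right (break_search_py array left right)

-- ===== LEMMAS AND PROOFS =====

-- the two midpoint expressions agree
lemma pv_mid_eq (left right : Int) :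
    PySem.Int.floordiv (left + right) 2 = left + (right - left) / 2 := by
  rw [PySem.Int.floordiv_eq_ediv_of_pos (by omega : (0:Int) < 2)]
  omega

-- in-range indices produce a value
lemma pv_get_some (array : List Int) (i : Int)
    (h1 : -(array.length : Int) ≤ i) (h2 : i < (array.length : Int)) :
    ∃ v, PySem.List.pyGet? array i = some v := by
  cases e : PySem.List.pyGet? array i with
  | none =>
      rw [PySem.List.pyGet?_eq_none_iff] at e
      exact absurd (by constructor <;> omega : PySem.Raise.InRange array.length i) e
  | some v => exact ⟨v, rfl⟩

-- one unfolding of A's recursion when all three reads are in range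
lemma pv_A_step (array : List Int) (left right : Int) (hlt : left < right)
    (am ap al : Int)
    (e1 : PySem.List.pyGet? array (PySem.Int.floordiv (left + right) 2) = some am)
    (e2 : PySem.List.pyGet? array (PySem.Int.floordiv (left + right) 2 - 1) = some ap)
    (e3 : PySem.List.pyGet? array left = some al) :
    break_search_py array left right =
      if am < ap then some (PySem.Int.floordiv (left + right) 2)
      else if am < al then break_search_py array left (PySem.Int.floordiv (left + right) 2)
      else if al < am then break_search_py array (PySem.Int.floordiv (left + right) 2) right
      else none := by
  rw [break_search_py, dif_neg (by omega : ¬ right ≤ left)]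
  split
  · rename_i am' ap' h1 h2
    rw [e1] at h1; injection h1 with h1; subst h1
    rw [e2] at h2; injection h2 with h2; subst h2
    by_cases hc : am < ap
    · rw [if_pos hc, if_pos hc]
    · rw [if_neg hc, if_neg hc]
      split
      · rename_i al' h3
        rw [e3] at h3; injection h3 with h3; subst h3
        split_ifs <;> rfl
      · rename_i h3
        rw [e3] at h3; cases h3
  · rename_i hno
    exact (hno am ap e1 e2).elim

-- the value of B's step when the three reads succeed
lemma pv_B_step (array : List Int) (left right : Int) (hlt : left < right)
    (am ap al : Int)
    (e1 : PySem.List.pyGet? array (PySem.Int.floordiv (left + right) 2) = some am)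
    (e2 : PySem.List.pyGet? array (PySem.Int.floordiv (left + right) 2 - 1) = some ap)
    (e3 : PySem.List.pyGet? array left = some al) :
    bsStep array left right =
      if am < ap then Sum.inl (some (PySem.Int.floordiv (left + right) 2))
      else if al < am then Sum.inr (PySem.Int.floordiv (left + right) 2, right)
      else if am < al then Sum.inr (left, PySem.Int.floordiv (left + right) 2)
      else Sum.inl none := by
  rw [pv_mid_eq] at e1 e2
  unfold bsStep
  rw [if_neg (by omega : ¬ right ≤ left)]
  simp only [e1, e2, e3]
  rw [← pv_mid_eq]


-- the driver, given the value of the step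
lemma pv_alt_inl (array : List Int) (left right : Int) (res : Option Int)
    (e : bsStep array left right = Sum.inl res) :
    break_search_py_alt array left right = res := by
  rw [break_search_py_alt]
  split
  · rename_i res' e'
    rw [e] at e'
    simp only [Sum.inl.injEq] at e'
    exact e'.symm
  · rename_i l' r' e'
    rw [e] at e'
    cases e'

lemma pv_alt_inr (array : List Int) (left right l' r' : Int)
    (e : bsStep array left right = Sum.inr (l', r')) :
    break_search_py_alt array left right = break_search_py_alt array l' r' := by
  rw [break_search_py_alt]
  split
  · rename_i res' e'
    rw [e] at e'
    cases e'
  · rename_i l'' r'' e'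
    rw [e] at e'
    simp only [Sum.inr.injEq, Prod.mk.injEq] at e'
    obtain ⟨hl, hr⟩ := e'
    rw [hl, hr]

-- main equivalence, by strong induction on the interval width
lemma pv_main (n : Nat) : ∀ (array : List Int) (left right : Int),
    (right - left).toNat ≤ n → Pre_break_search_py array left right →
    break_search_py array left right = break_search_py_alt array left right := by
  induction n with
  | zero =>
      intro array left right hn _
      have hrl : right ≤ left := by omega
      rw [break_search_py, dif_pos hrl,
          pv_alt_inl array left right (some right) (by unfold bsStep; rw [if_pos hrl])]
  | succ n ih =>
      intro array left right hn hpre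
      by_cases hrl : right ≤ left
      · rw [break_search_py, dif_pos hrl,
            pv_alt_inl array left right (some right) (by unfold bsStep; rw [if_pos hrl])]
      · have hlt : left < right := lt_of_not_ge hrl
        obtain ⟨h1L, h2L⟩ : 1 - (array.length : Int) ≤ left ∧ right ≤ (array.length : Int) := by
          rcases hpre with h | h
          · omega
          · exact h
        have hb := PySem.Int.floordiv_two_mid_bounds (le_of_lt hlt)
        have hmr : PySem.Int.floordiv (left + right) 2 < right := by
          rw [PySem.Int.floordiv_lt_iff_lt_mul (by omega : (0:Int) < 2)]; omega
        obtain ⟨am, e1⟩ := pv_get_some array (PySem.Int.floordiv (left + right) 2) (by omega) (by omega)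
        obtain ⟨ap, e2⟩ := pv_get_some array (PySem.Int.floordiv (left + right) 2 - 1) (by omega) (by omega)
        obtain ⟨al, e3⟩ := pv_get_some array left (by omega) (by omega)
        have hml : PySem.Int.floordiv (left + right) 2 = left → am = al := by
          intro he
          rw [he] at e1
          rw [e1] at e3
          injection e3
        have eB := pv_B_step array left right hlt am ap al e1 e2 e3
        rw [pv_A_step array left right hlt am ap al e1 e2 e3]
        by_cases hc1 : am < ap
        · rw [if_pos hc1] at eB ⊢
          rw [pv_alt_inl array left right _ eB]
        · rw [if_neg hc1] at eB ⊢
          by_cases hc2 : am < al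
          · rw [if_neg (by omega : ¬ al < am), if_pos hc2] at eB
            rw [if_pos hc2, pv_alt_inr array left right _ _ eB]
            exact ih array left (PySem.Int.floordiv (left + right) 2) (by omega)
              (Or.inr ⟨by omega, by omega⟩)
          · by_cases hc3 : al < am
            · rw [if_pos hc3] at eB
              rw [if_neg hc2, if_pos hc3, pv_alt_inr array left right _ _ eB]
              have hlm : left < PySem.Int.floordiv (left + right) 2 := by
                rcases lt_or_eq_of_le hb.1 with h | h
                · exact h
                · exact absurd (hml h.symm) (by omega)
              exact ih array (PySem.Int.floordiv (left + right) 2) right (by omega)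
                (Or.inr ⟨by omega, by omega⟩)
            · rw [if_neg (by omega : ¬ al < am), if_neg hc2] at eB
              rw [if_neg hc2, if_neg hc3, pv_alt_inl array left right _ eB]

-- ===== VERDICT (by name: the statement is the Claim_ definition above) =====
theorem break_search_py_spec : Claim_equal_break_search_py := by
  intro array left right _ hpre
  unfold Spec_break_search_py
  exact pv_main (right - left).toNat array left right le_rfl hpre
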